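-- pv_equiv track=rewrite | github.com/Fhernd/PythonEjercicios | Parte002/ex1060_hacker_rank_ganancias_tienda_zapatos_raghu.py | compute_total_money_earned
-- ===== SOURCE A (Python) =====
-- from collections import Counter
--
-- def compute_total_money_earned(x, sizes, sizes_prices):
--     total_earned = 0
--     available_sizes = dict(Counter(sizes))
--
--     for i in range(len(sizes_prices)):
--         size_price = sizes_prices[i]
--         size = size_price[0]
--         price = size_price[1]
--
--         if size in available_sizes:
--             if available_sizes[size]:
--                 available_sizes[size] -= 1
--                 total_earned += price
--
--     return total_earned
-- ===== SOURCE B (Python) =====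
-- def compute_total_money_earned(x, sizes, sizes_prices):
--     # Peel off one shoe size at a time: sell to the first min(stock, requests)
--     # requesters of that size, then drop all requests of that size.
--     total = 0
--     rest = sizes_prices
--     while rest:
--         s = rest[0][0]
--         prices = [p for t, p in rest if t == s]
--         rest = [(t, p) for t, p in rest if t != s]
--         k = min(sizes.count(s), len(prices))
--         total += sum(prices[:k])
--     return total
-- ===== Notes on version B (the rewrite author's own statement) =====
-- stated objective: alternative
-- what changed: A makes one pass over the requests decrementing a Counter of the inventory; B instead peels off one shoe size at a time, summing the first min(stock, #requests) request prices of that size and dropping that size's remaining requests.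
import Mathlib
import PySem

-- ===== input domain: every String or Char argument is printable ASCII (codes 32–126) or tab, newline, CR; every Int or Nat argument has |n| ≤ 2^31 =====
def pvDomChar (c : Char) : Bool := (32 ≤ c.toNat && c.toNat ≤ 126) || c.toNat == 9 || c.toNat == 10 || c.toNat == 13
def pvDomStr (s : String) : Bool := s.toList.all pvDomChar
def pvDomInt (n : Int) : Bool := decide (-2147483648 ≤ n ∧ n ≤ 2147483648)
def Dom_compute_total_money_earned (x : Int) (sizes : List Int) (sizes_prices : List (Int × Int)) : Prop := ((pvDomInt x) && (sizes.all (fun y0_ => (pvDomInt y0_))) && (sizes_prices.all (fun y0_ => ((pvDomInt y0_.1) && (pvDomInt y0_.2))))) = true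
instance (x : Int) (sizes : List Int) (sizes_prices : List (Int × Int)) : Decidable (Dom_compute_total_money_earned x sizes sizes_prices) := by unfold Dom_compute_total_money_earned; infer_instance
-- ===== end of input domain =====

-- B replaces A's single pass with a decremented Counter by peeling off one shoe size at a time:
-- sum the first min(stock, requests) request prices of that size, then drop that size's requests
-- (objective: alternative decomposition; not faster).

-- ===== PORT A =====
def pvStepA (st : PySem.Dict Int Int × Int) (sp : Int × Int) : PySem.Dict Int Int × Int :=
  if st.1.contains sp.1 then
    if st.1.getD sp.1 0 ≠ 0 then (st.1.insert sp.1 (st.1.getD sp.1 0 - 1), st.2 + sp.2)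
    else st
  else st

def compute_total_money_earned (x : Int) (sizes : List Int) (sizes_prices : List (Int × Int)) : Int :=
  let available := PySem.Dict.counter sizes
  (sizes_prices.foldl pvStepA (available, 0)).2

-- ===== PORT B =====
def pvAltLoop (sizes : List Int) : Nat → List (Int × Int) → Int → Int
  | _, [], total => total
  | 0, _, total => total
  | fuel + 1, (s, p) :: r, total =>
    let prices := (((s, p) :: r).filter (fun tp => tp.1 == s)).map Prod.snd
    let rest := ((s, p) :: r).filter (fun tp => tp.1 != s)
    let k : Int := min ((PySem.List.count sizes s : Int)) ((prices.length : Int))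
    pvAltLoop sizes fuel rest (total + (PySem.List.slice prices none (some k)).sum)

def compute_total_money_earned_alt (x : Int) (sizes : List Int) (sizes_prices : List (Int × Int)) : Int :=
  pvAltLoop sizes sizes_prices.length sizes_prices 0


-- ===== PRECONDITION & SPEC =====
def Spec_compute_total_money_earned (x : Int) (sizes : List Int) (sizes_prices : List (Int × Int)) (out : Int) : Prop := out = compute_total_money_earned_alt x sizes sizes_prices
instance (x : Int) (sizes : List Int) (sizes_prices : List (Int × Int)) (out : Int) : Decidable (Spec_compute_total_money_earned x sizes sizes_prices out) := by unfold Spec_compute_total_money_earned; infer_instance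

-- ===== CLAIM (what is proved, stated in full; the proofs are below) =====
def Claim_equal_compute_total_money_earned : Prop := ∀ (x : Int) (sizes : List Int) (sizes_prices : List (Int × Int)), Dom_compute_total_money_earned x sizes sizes_prices → Spec_compute_total_money_earned x sizes sizes_prices (compute_total_money_earned x sizes sizes_prices)

-- ===== LEMMAS AND PROOFS =====
-- ===== proof machinery =====
def pvSell (A : Int → Int) : List (Int × Int) → Int
  | [] => 0
  | (s, p) :: r =>
    if A s ≠ 0 then p + pvSell (fun t => if t = s then A s - 1 else A t) r
    else pvSell A r

def pvSpend : Int → List Int → Int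
  | _, [] => 0
  | v, p :: ps => if 0 < v then p + pvSpend (v - 1) ps else 0

lemma pvSell_congr (A B : Int → Int) (l : List (Int × Int)) (h : ∀ t, A t = B t) :
    pvSell A l = pvSell B l := by
  induction l generalizing A B with
  | nil => rfl
  | cons hd r ih =>
    obtain ⟨s, p⟩ := hd
    simp only [pvSell, h s]
    split_ifs with hc
    · exact congrArg (p + ·) (ih _ _ (fun t => by by_cases ht : t = s <;> simp [ht, h]))
    · exact ih _ _ h

lemma foldl_stepA (l : List (Int × Int)) (d : PySem.Dict Int Int) (t : Int) :
    (l.foldl pvStepA (d, t)).2 = t + pvSell (fun s => d.getD s 0) l := by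
  induction l generalizing d t with
  | nil => simp [pvSell]
  | cons hd r ih =>
    obtain ⟨s, p⟩ := hd
    simp only [List.foldl_cons, pvStepA]
    by_cases hc : d.contains s = true
    · by_cases hv : d.getD s 0 ≠ 0
      · rw [if_pos hc, if_pos hv, ih]
        simp only [pvSell]
        rw [if_pos hv,
            pvSell_congr (fun k => (d.insert s (d.getD s 0 - 1)).getD k 0)
              (fun k => if k = s then d.getD s 0 - 1 else d.getD k 0) r
              (fun k => by simp [PySem.Dict.getD_insert])]
        ring
      · rw [if_pos hc, if_neg hv, ih]
        push_neg at hv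
        simp [pvSell, hv]
    · rw [if_neg hc, ih]
      have h0 : d.getD s 0 = 0 := PySem.Dict.getD_of_not_contains d 0 (by simpa using hc)
      simp [pvSell, h0]

lemma pvSell_skip (A : Int → Int) (s : Int) (w : Int) (l : List (Int × Int))
    (h : ∀ tp ∈ l, tp.1 ≠ s) :
    pvSell (fun t => if t = s then w else A t) l = pvSell A l := by
  induction l generalizing A with
  | nil => rfl
  | cons hd r ih =>
    obtain ⟨u, p⟩ := hd
    have hu : u ≠ s := h (u, p) (List.mem_cons_self)
    have hr : ∀ tp ∈ r, tp.1 ≠ s := fun tp htp => h tp (List.mem_cons_of_mem _ htp)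
    simp only [pvSell]
    rw [if_neg hu]
    split_ifs with hc
    · congr 1
      rw [pvSell_congr _ (fun t => if t = s then w else (if t = u then A u - 1 else A t)) r
            (fun t => by by_cases h1 : t = u <;> by_cases h2 : t = s <;>
                          simp_all)]
      exact ih _ hr
    · exact ih _ hr

lemma pvSpend_zero (ps : List Int) : pvSpend 0 ps = 0 := by
  cases ps <;> simp [pvSpend]

lemma pvSell_peel (l : List (Int × Int)) (A : Int → Int) (s : Int) (hA : ∀ t, 0 ≤ A t) :
    pvSell A l = pvSpend (A s) ((l.filter (fun tp => tp.1 == s)).map Prod.snd)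
                 + pvSell A (l.filter (fun tp => tp.1 != s)) := by
  induction l generalizing A with
  | nil => simp [pvSell, pvSpend]
  | cons hd r ih =>
    obtain ⟨u, p⟩ := hd
    by_cases hu : u = s
    · subst hu
      simp only [List.filter_cons, beq_self_eq_true, if_true, bne_self_eq_false,
        Bool.false_eq_true, if_false, List.map_cons]
      by_cases hv : A u ≠ 0
      · have hpos : 0 < A u := lt_of_le_of_ne (hA u) (Ne.symm hv)
        have hupd : ∀ t, 0 ≤ (fun t => if t = u then A u - 1 else A t) t := by
          intro t; by_cases ht : t = u
          · simp only [ht]; omega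
          · simp only [if_neg ht]; exact hA t
        have e1 : pvSell A ((u, p) :: r)
            = p + pvSell (fun t => if t = u then A u - 1 else A t) r := by
          simp only [pvSell]; rw [if_pos hv]
        have e2 : pvSpend (A u) (p :: (r.filter (fun tp => tp.1 == u)).map Prod.snd)
            = p + pvSpend (A u - 1) ((r.filter (fun tp => tp.1 == u)).map Prod.snd) := by
          simp only [pvSpend]; rw [if_pos hpos]
        have hskip : pvSell (fun t => if t = u then A u - 1 else A t)
            (r.filter (fun tp => tp.1 != u)) = pvSell A (r.filter (fun tp => tp.1 != u)) := by
          apply pvSell_skip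
          intro tp htp
          simpa using List.of_mem_filter htp
        rw [e1, ih _ hupd, hskip, e2]
        simp only [if_true]
        ring
      · push_neg at hv
        have e1 : pvSell A ((u, p) :: r) = pvSell A r := by
          simp [pvSell, hv]
        have e2 : pvSpend (A u) (p :: (r.filter (fun tp => tp.1 == u)).map Prod.snd) = 0 := by
          simp [pvSpend, hv]
        rw [e1, ih _ hA, e2, hv, pvSpend_zero]
    · have hbeq : (u == s) = false := by simp [hu]
      have hbne : (u != s) = true := by simp [hu]
      simp only [List.filter_cons, hbeq, Bool.false_eq_true, if_false, hbne, if_true]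
      simp only [pvSell]
      split_ifs with hc
      · have hpos : 0 < A u := lt_of_le_of_ne (hA u) (Ne.symm hc)
        have hupd : ∀ t, 0 ≤ (fun t => if t = u then A u - 1 else A t) t := by
          intro t; by_cases ht : t = u
          · simp only [ht]; omega
          · simp only [if_neg ht]; exact hA t
        rw [ih _ hupd]
        rw [if_neg (fun h => hu h.symm)]
        ring
      · rw [ih _ hA]

lemma pvSpend_eq_take (ps : List Int) (v : Int) (hv : 0 ≤ v) :
    pvSpend v ps = (ps.take (min v (ps.length : Int)).toNat).sum := by
  induction ps generalizing v with
  | nil => simp [pvSpend]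
  | cons p ps ih =>
    by_cases hp : 0 < v
    · simp only [pvSpend, if_pos hp]
      rw [ih (v - 1) (by omega)]
      have h1 : (min v (((p :: ps).length : Int))).toNat
          = (min (v - 1) ((ps.length : Int))).toNat + 1 := by
        simp only [List.length_cons]
        omega
      rw [h1, List.take_succ_cons, List.sum_cons]
    · have hv0 : v = 0 := by omega
      subst hv0
      have : (min (0 : Int) (((p :: ps).length : Int))).toNat = 0 := by
        simp
      rw [this]
      simp [pvSpend]

lemma pvAlt_eq_sell (sizes : List Int) (fuel : Nat) (l : List (Int × Int))
    (h : l.length ≤ fuel) (total : Int) :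
    pvAltLoop sizes fuel l total
      = total + pvSell (fun s => ((PySem.List.count sizes s : Int))) l := by
  induction fuel generalizing l total with
  | zero =>
    have : l = [] := List.eq_nil_of_length_eq_zero (Nat.le_zero.mp h)
    subst this
    simp [pvAltLoop, pvSell]
  | succ fuel ih =>
    cases l with
    | nil => simp [pvAltLoop, pvSell]
    | cons hd r =>
      obtain ⟨s, p⟩ := hd
      simp only [pvAltLoop]
      have hrest : (((s, p) :: r).filter (fun tp => tp.1 != s)).length ≤ fuel := by
        simp only [List.filter_cons, bne_self_eq_false, Bool.false_eq_true, if_false]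
        exact le_trans (List.length_filter_le _ _) (by simpa using Nat.lt_succ_iff.mp (Nat.lt_succ_of_le h))
      rw [ih _ hrest]
      rw [pvSell_peel ((s, p) :: r) _ s (fun t => Int.natCast_nonneg _)]
      have hk : (0 : Int) ≤ min ((PySem.List.count sizes s : Int))
          (((((s, p) :: r).filter (fun tp => tp.1 == s)).map Prod.snd).length : Int) :=
        le_min (Int.natCast_nonneg _) (Int.natCast_nonneg _)
      rw [PySem.List.slice_to _ hk]
      rw [pvSpend_eq_take _ _ (Int.natCast_nonneg _)]
      ring


-- ===== VERDICT (by name: the statement is the Claim_ definition above) =====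
theorem compute_total_money_earned_spec : Claim_equal_compute_total_money_earned := by
  intro x sizes sizes_prices _
  show compute_total_money_earned x sizes sizes_prices
      = compute_total_money_earned_alt x sizes sizes_prices
  show (sizes_prices.foldl pvStepA (PySem.Dict.counter sizes, 0)).2
      = compute_total_money_earned_alt x sizes sizes_prices
  rw [foldl_stepA]
  rw [pvSell_congr _ (fun s => ((PySem.List.count sizes s : Int))) _
        (fun t => by simp [PySem.Dict.getD_counter, PySem.List.count_eq])]
  show _ = pvAltLoop sizes sizes_prices.length sizes_prices 0
  rw [pvAlt_eq_sell sizes _ _ le_rfl]
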